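-- pv_equiv track=rewrite | github.com/irom-princeton/factored-scaling-curves | scripts/simulation/collect_sim_traj_per_factor_by_replay.py | find_pick_and_place_times
-- ===== SOURCE A (Python) =====
-- def find_pick_and_place_times(gripper_position):
--     pick_start = -1
--     place_start = -1
--
--     # Find the start of the last subsequence of 1
--     for i in range(len(gripper_position) - 1, -1, -1):
--         if gripper_position[i] == 1:
--             pick_start = i
--         elif pick_start != -1:
--             # Found the start of the last subsequence of 1
--             break
--
--     # Find the start of the immediate subsequence of 0 after pick_start
--     if pick_start != -1:
--         for i in range(pick_start + 1, len(gripper_position)):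
--             if gripper_position[i] == 0:
--                 place_start = i
--                 break
--
--     return pick_start, place_start
-- ===== SOURCE B (Python) =====
-- def find_pick_and_place_times(gripper_position):
--     pick_start = -1
--     place_start = -1
--     in_run = False
--     for i, v in enumerate(gripper_position):
--         if v == 1:
--             if not in_run:
--                 pick_start = i
--                 place_start = -1
--                 in_run = True
--         else:
--             in_run = False
--             if pick_start != -1 and place_start == -1 and v == 0:
--                 place_start = i
--     return pick_start, place_start
-- ===== Notes on version B (the rewrite author's own statement) =====
-- stated objective: alternative
-- what changed: Replaces A's backward scan (to find the last 1-run start) plus a second forward scan (first 0 after it) with a single forward pass maintaining an in_run flag that resets place_start whenever a new 1-run begins.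
import Mathlib
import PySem

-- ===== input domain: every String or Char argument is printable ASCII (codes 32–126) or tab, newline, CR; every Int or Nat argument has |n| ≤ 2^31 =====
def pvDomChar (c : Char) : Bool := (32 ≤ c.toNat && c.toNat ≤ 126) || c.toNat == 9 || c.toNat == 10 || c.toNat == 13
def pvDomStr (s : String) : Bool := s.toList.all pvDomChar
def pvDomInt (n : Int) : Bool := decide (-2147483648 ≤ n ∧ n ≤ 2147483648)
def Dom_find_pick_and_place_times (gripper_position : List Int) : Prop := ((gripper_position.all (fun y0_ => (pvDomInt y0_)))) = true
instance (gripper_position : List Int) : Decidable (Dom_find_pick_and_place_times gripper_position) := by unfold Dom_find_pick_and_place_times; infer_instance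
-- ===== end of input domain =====

-- B replaces A's backward scan for the last 1-run plus a second forward scan for the
-- following 0 with a single forward pass keeping an in_run flag (objective: alternative).

-- ===== PORT A =====
-- first loop: for i in range(len-1, -1, -1), with break once pick_start is set and a non-1 is seen
def fpLoop1 (g : List Int) : List Int → Int → Int
  | [], ps => ps
  | i :: rest, ps =>
    if PySem.List.pyGetD g i 0 = 1 then fpLoop1 g rest i
    else if ps ≠ -1 then ps
    else fpLoop1 g rest ps

-- second loop: for i in range(pick_start+1, len), break at the first 0 (returns -1 if none)
def fpLoop2 (g : List Int) : List Int → Int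
  | [] => -1
  | i :: rest => if PySem.List.pyGetD g i 0 = 0 then i else fpLoop2 g rest

def find_pick_and_place_times (gripper_position : List Int) : Int × Int :=
  let pick_start := fpLoop1 gripper_position
    (PySem.List.pyRange ((gripper_position.length : Int) - 1) (-1) (-1)) (-1)
  let place_start :=
    if pick_start ≠ -1 then
      fpLoop2 gripper_position
        (PySem.List.pyRange (pick_start + 1) (gripper_position.length : Int) 1)
    else -1
  (pick_start, place_start)

-- ===== PORT B =====
-- one step of B's forward pass; state = (pick_start, place_start, in_run)
def fpStep (s : Int × Int × Bool) (iv : Int × Int) : Int × Int × Bool :=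
  if iv.2 = 1 then
    if ¬ s.2.2 then (iv.1, -1, true) else s
  else
    if s.1 ≠ -1 ∧ s.2.1 = -1 ∧ iv.2 = 0 then (s.1, iv.1, false)
    else (s.1, s.2.1, false)

def find_pick_and_place_times_alt (gripper_position : List Int) : Int × Int :=
  let s := (PySem.List.enumerate gripper_position 0).foldl fpStep (-1, -1, false)
  (s.1, s.2.1)

-- ===== PRECONDITION & SPEC =====
def Spec_find_pick_and_place_times (gripper_position : List Int) (out : Int × Int) : Prop := out = find_pick_and_place_times_alt gripper_position
instance (gripper_position : List Int) (out : Int × Int) : Decidable (Spec_find_pick_and_place_times gripper_position out) := by unfold Spec_find_pick_and_place_times; infer_instance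

-- ===== CLAIM (what is proved, stated in full; the proofs are below) =====
def Claim_equal_find_pick_and_place_times : Prop := ∀ (gripper_position : List Int), Dom_find_pick_and_place_times gripper_position → Spec_find_pick_and_place_times gripper_position (find_pick_and_place_times gripper_position)

-- ===== LEMMAS AND PROOFS =====

-- number of trailing 1s
def tOnes (g : List Int) : Nat := (g.reverse.takeWhile (fun x => x == 1)).length

theorem tOnes_append (g : List Int) (x : Int) :
    tOnes (g ++ [x]) = if x = 1 then tOnes g + 1 else 0 := by
  simp only [tOnes, List.reverse_append, List.reverse_singleton, List.singleton_append,
    List.takeWhile_cons]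
  split_ifs with h <;> simp_all

theorem tOnes_le (g : List Int) : tOnes g ≤ g.length := by
  have h := (List.takeWhile_sublist (fun x : Int => x == 1) (l := g.reverse)).length_le
  simpa [tOnes] using h

theorem pyGetD_append_left (g : List Int) (x : Int) (i : Int)
    (h0 : 0 ≤ i) (h1 : i < (g.length : Int)) :
    PySem.List.pyGetD (g ++ [x]) i 0 = PySem.List.pyGetD g i 0 := by
  rw [PySem.List.pyGetD_eq_getElem (g ++ [x]) 0 h0 (by simp; omega),
      PySem.List.pyGetD_eq_getElem g 0 h0 (by simpa using h1)]
  exact List.getElem_append_left (by omega)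

theorem pyGetD_append_length (g : List Int) (x : Int) :
    PySem.List.pyGetD (g ++ [x]) (g.length : Int) 0 = x := by
  rw [PySem.List.pyGetD_eq_getElem (g ++ [x]) 0 (by omega) (by simp)]
  simp

theorem mem_range_bounds (g : List Int) :
    ∀ i ∈ PySem.List.pyRange ((g.length : Int) - 1) (-1) (-1), 0 ≤ i ∧ i < (g.length : Int) := by
  intro i hi
  rw [PySem.List.mem_pyRange_neg_one] at hi
  omega

theorem fpLoop1_stable (g : List Int) (x : Int) (idxs : List Int)
    (h : ∀ i ∈ idxs, 0 ≤ i ∧ i < (g.length : Int)) (ps : Int) :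
    fpLoop1 (g ++ [x]) idxs ps = fpLoop1 g idxs ps := by
  induction idxs generalizing ps with
  | nil => rfl
  | cons i rest ih =>
    have hi := h i (by simp)
    have hrest : ∀ j ∈ rest, 0 ≤ j ∧ j < (g.length : Int) := fun j hj => h j (by simp [hj])
    simp only [fpLoop1, pyGetD_append_left g x i hi.1 hi.2]
    split_ifs <;> first | rfl | exact ih hrest _

theorem fpLoop2_stable (g : List Int) (x : Int) (idxs : List Int)
    (h : ∀ i ∈ idxs, 0 ≤ i ∧ i < (g.length : Int)) :
    fpLoop2 (g ++ [x]) idxs = fpLoop2 g idxs := by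
  induction idxs with
  | nil => rfl
  | cons i rest ih =>
    have hi := h i (by simp)
    have hrest : ∀ j ∈ rest, 0 ≤ j ∧ j < (g.length : Int) := fun j hj => h j (by simp [hj])
    simp only [fpLoop2, pyGetD_append_left g x i hi.1 hi.2]
    split_ifs <;> first | rfl | exact ih hrest

theorem fpLoop2_append_singleton (g : List Int) (l1 : List Int) (j : Int)
    (h : ∀ i ∈ l1, 0 ≤ i) :
    fpLoop2 g (l1 ++ [j]) =
      if fpLoop2 g l1 = -1 then (if PySem.List.pyGetD g j 0 = 0 then j else -1)
      else fpLoop2 g l1 := by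
  induction l1 with
  | nil => simp [fpLoop2]
  | cons i rest ih =>
    have hi := h i (by simp)
    have hrest : ∀ k ∈ rest, 0 ≤ k := fun k hk => h k (by simp [hk])
    by_cases h1 : PySem.List.pyGetD g i 0 = 0
    · have hne : ¬ (i = -1) := by omega
      simp [fpLoop2, h1, hne]
    · simp only [List.cons_append, fpLoop2, if_neg h1]
      exact ih hrest

-- the backward scan with a nonnegative accumulator finds the start of the trailing 1-run
theorem fpLoop1_pos (g : List Int) (ps : Int) (hps : 0 ≤ ps) :
    fpLoop1 g (PySem.List.pyRange ((g.length : Int) - 1) (-1) (-1)) ps =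
      if 0 < tOnes g then (g.length : Int) - tOnes g else ps := by
  induction g using List.reverseRecOn generalizing ps with
  | nil =>
    rw [PySem.List.pyRange_neg_one_eq_nil (by simp)]
    simp [fpLoop1, tOnes]
  | append_singleton g x ih =>
    have hn : ((g ++ [x]).length : Int) - 1 = (g.length : Int) := by simp
    rw [hn, PySem.List.pyRange_neg_one_cons (by omega)]
    by_cases hx : x = 1
    · subst hx
      have h2 : tOnes (g ++ [1]) = tOnes g + 1 := by rw [tOnes_append]; simp
      have h3 : ((g ++ [1]).length : Int) = (g.length : Int) + 1 := by simp
      rw [h2, h3]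
      simp only [fpLoop1]
      rw [pyGetD_append_length g 1, if_pos rfl,
        fpLoop1_stable g 1 _ (mem_range_bounds g), ih _ (by omega)]
      have ht := tOnes_le g
      split_ifs <;> push_cast <;> omega
    · have h2 : tOnes (g ++ [x]) = 0 := by rw [tOnes_append]; simp [hx]
      rw [h2]
      simp only [fpLoop1]
      rw [pyGetD_append_length g x, if_neg hx, if_pos (show ps ≠ -1 by omega)]
      simp

-- how A's pick-loop reacts to one element appended on the right
theorem A_pick_step (g : List Int) (x : Int) :
    fpLoop1 (g ++ [x]) (PySem.List.pyRange (((g ++ [x]).length : Int) - 1) (-1) (-1)) (-1) =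
      if x = 1 then
        (if 0 < tOnes g then (g.length : Int) - tOnes g else (g.length : Int))
      else fpLoop1 g (PySem.List.pyRange ((g.length : Int) - 1) (-1) (-1)) (-1) := by
  have hn : ((g ++ [x]).length : Int) - 1 = (g.length : Int) := by simp
  rw [hn, PySem.List.pyRange_neg_one_cons (by omega)]
  by_cases hx : x = 1
  · rw [if_pos hx]
    simp only [fpLoop1]
    rw [pyGetD_append_length g x, if_pos hx,
      fpLoop1_stable g x _ (mem_range_bounds g), fpLoop1_pos g _ (by omega)]
  · rw [if_neg hx]
    simp only [fpLoop1]
    rw [pyGetD_append_length g x, if_neg hx, if_neg (by simp),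
      fpLoop1_stable g x _ (mem_range_bounds g)]

-- how A's place-loop reacts to one element appended on the right
theorem A_place_step (g : List Int) (x p : Int) (h0 : 0 ≤ p + 1) (h1 : p + 1 ≤ (g.length : Int)) :
    fpLoop2 (g ++ [x]) (PySem.List.pyRange (p + 1) (((g ++ [x]).length : Int)) 1) =
      if fpLoop2 g (PySem.List.pyRange (p + 1) (g.length : Int) 1) = -1 then
        (if x = 0 then (g.length : Int) else -1)
      else fpLoop2 g (PySem.List.pyRange (p + 1) (g.length : Int) 1) := by
  have hn : ((g ++ [x]).length : Int) = (g.length : Int) + 1 := by simp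
  rw [hn, PySem.List.pyRange_one_succ_right h1]
  rw [fpLoop2_append_singleton (g ++ [x]) _ _ (by
    intro i hi; rw [PySem.List.mem_pyRange_one] at hi; omega)]
  rw [fpLoop2_stable g x _ (by
    intro i hi; rw [PySem.List.mem_pyRange_one] at hi; exact ⟨by omega, hi.2⟩)]
  rw [pyGetD_append_length]

theorem enumerate_append_singleton (g : List Int) (x : Int) (s : Int) :
    PySem.List.enumerate (g ++ [x]) s =
      PySem.List.enumerate g s ++ [(s + g.length, x)] := by
  induction g generalizing s with
  | nil => simp [PySem.List.enumerate_cons, PySem.List.enumerate_nil]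
  | cons y g ih =>
    simp only [List.cons_append, PySem.List.enumerate_cons, ih]
    simp
    ring_nf

-- the main invariant, by induction on the list from the right
theorem fp_main (g : List Int) :
    find_pick_and_place_times g =
      (((PySem.List.enumerate g 0).foldl fpStep (-1, -1, false)).1,
       ((PySem.List.enumerate g 0).foldl fpStep (-1, -1, false)).2.1)
    ∧ ((PySem.List.enumerate g 0).foldl fpStep (-1, -1, false)).2.2 = decide (0 < tOnes g)
    ∧ (((PySem.List.enumerate g 0).foldl fpStep (-1, -1, false)).1 = -1 →
        ((PySem.List.enumerate g 0).foldl fpStep (-1, -1, false)).2.1 = -1)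
    ∧ (0 < tOnes g →
        ((PySem.List.enumerate g 0).foldl fpStep (-1, -1, false)).1 =
          (g.length : Int) - tOnes g)
    ∧ (-1 ≤ ((PySem.List.enumerate g 0).foldl fpStep (-1, -1, false)).1
        ∧ ((PySem.List.enumerate g 0).foldl fpStep (-1, -1, false)).1 < (g.length : Int)) := by
  induction g using List.reverseRecOn with
  | nil => decide
  | append_singleton g x ih =>
    obtain ⟨hA, hr, hpq, hpt, hlb, hub⟩ := ih
    set s := (PySem.List.enumerate g 0).foldl fpStep (-1, -1, false) with hs
    simp only [find_pick_and_place_times] at hA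
    rw [Prod.mk.injEq] at hA
    obtain ⟨hApick, hAplace⟩ := hA
    rw [hApick] at hAplace
    have hB : (PySem.List.enumerate (g ++ [x]) 0).foldl fpStep (-1, -1, false)
        = fpStep s ((g.length : Int), x) := by
      rw [enumerate_append_singleton, List.foldl_append, ← hs]
      norm_num [List.foldl]
    rw [hB]
    have hpick' := A_pick_step g x
    rw [hApick] at hpick'
    by_cases hx : x = 1
    · subst hx
      have ht1 : tOnes (g ++ [1]) = tOnes g + 1 := by rw [tOnes_append]; simp
      have hlen : ((g ++ [1]).length : Int) = (g.length : Int) + 1 := by simp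
      by_cases ht : 0 < tOnes g
      · have htle := tOnes_le g
        have hp := hpt ht
        have hrt : s.2.2 = true := by rw [hr]; simp [ht]
        have hBv : fpStep s ((g.length : Int), 1) = s := by simp [fpStep, hrt]
        rw [hBv]
        have hpick2 : fpLoop1 (g ++ [1])
            (PySem.List.pyRange (((g ++ [1]).length : Int) - 1) (-1) (-1)) (-1) = s.1 := by
          rw [hpick', if_pos rfl, if_pos ht, hp]
        have hs1 : s.1 ≠ -1 := by omega
        rw [if_pos hs1] at hAplace
        refine ⟨?_, ?_, hpq, ?_, ?_, ?_⟩
        · simp only [find_pick_and_place_times, hpick2]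
          rw [Prod.mk.injEq]
          refine ⟨rfl, ?_⟩
          rw [if_pos hs1, A_place_step g 1 s.1 (by omega) (by omega), hAplace]
          split_ifs with h h2 <;> omega
        · rw [ht1, hrt]; simp
        · intro _
          rw [ht1, hlen, hp]; push_cast; ring
        · omega
        · rw [hlen]; omega
      · have hrf : s.2.2 = false := by rw [hr]; simp [ht]
        have hBv : fpStep s ((g.length : Int), 1) = ((g.length : Int), -1, true) := by
          simp [fpStep, hrf]
        rw [hBv]
        have hpick2 : fpLoop1 (g ++ [1])
            (PySem.List.pyRange (((g ++ [1]).length : Int) - 1) (-1) (-1)) (-1)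
            = (g.length : Int) := by
          rw [hpick', if_pos rfl, if_neg ht]
        have hlen1 : ((g ++ [1]).length : Int) = (g.length : Int) + 1 := by simp
        refine ⟨?_, ?_, ?_, ?_, ?_, ?_⟩
        · simp only [find_pick_and_place_times, hpick2]
          rw [Prod.mk.injEq]
          refine ⟨rfl, ?_⟩
          rw [if_pos (show (g.length : Int) ≠ -1 by omega), hlen1,
            PySem.List.pyRange_one_eq_nil (by omega)]
          rfl
        · rw [ht1]; simp
        · intro _; rfl
        · intro _; rw [ht1, hlen]; push_cast; omega
        · omega
        · rw [hlen]; omega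
    · have ht0 : tOnes (g ++ [x]) = 0 := by rw [tOnes_append]; simp [hx]
      have hlen : ((g ++ [x]).length : Int) = (g.length : Int) + 1 := by simp
      have hpick2 : fpLoop1 (g ++ [x])
          (PySem.List.pyRange (((g ++ [x]).length : Int) - 1) (-1) (-1)) (-1) = s.1 := by
        rw [hpick', if_neg hx]
      by_cases hc : s.1 ≠ -1 ∧ s.2.1 = -1 ∧ x = 0
      · obtain ⟨hc1, hc2, hc3⟩ := hc
        have hBv : fpStep s ((g.length : Int), x) = (s.1, (g.length : Int), false) := by
          simp [fpStep, hc3, hc1, hc2]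
        rw [hBv]
        rw [if_pos hc1] at hAplace
        refine ⟨?_, ?_, ?_, ?_, ?_, ?_⟩
        · simp only [find_pick_and_place_times, hpick2]
          rw [Prod.mk.injEq]
          refine ⟨rfl, ?_⟩
          rw [if_pos hc1, A_place_step g x s.1 (by omega) (by omega), hAplace,
            if_pos hc2, if_pos hc3]
        · rw [ht0]; simp
        · intro h; exact absurd h hc1
        · intro h; rw [ht0] at h; omega
        · omega
        · rw [hlen]; omega
      · have hBv : fpStep s ((g.length : Int), x) = (s.1, s.2.1, false) := by
          simp [fpStep, hx, hc]
        rw [hBv]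
        refine ⟨?_, ?_, hpq, ?_, ?_, ?_⟩
        · simp only [find_pick_and_place_times, hpick2]
          rw [Prod.mk.injEq]
          refine ⟨rfl, ?_⟩
          by_cases hs1 : s.1 = -1
          · rw [if_neg (not_not_intro hs1)]
            rw [if_neg (not_not_intro hs1)] at hAplace
            exact hAplace
          · rw [if_pos hs1, A_place_step g x s.1 (by omega) (by omega)]
            rw [if_pos hs1] at hAplace
            rw [hAplace]
            by_cases hq : s.2.1 = -1
            · have hx0 : x ≠ 0 := fun h0 => hc ⟨hs1, hq, h0⟩
              rw [if_pos hq, if_neg hx0, hq]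
            · rw [if_neg hq]
        · rw [ht0]; simp
        · intro h; rw [ht0] at h; omega
        · omega
        · rw [hlen]; omega

-- ===== VERDICT (by name: the statement is the Claim_ definition above) =====
theorem find_pick_and_place_times_spec : Claim_equal_find_pick_and_place_times := by
  intro g _
  unfold Spec_find_pick_and_place_times find_pick_and_place_times_alt
  exact (fp_main g).1
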